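-- pv_equiv track=rewrite | github.com/YashBhamore/UniGuide-AI | src/split_uikd_items.py | enforce_min_chunk_words
-- ===== SOURCE A (Python) =====
-- def count_words(text: str) -> int:
--     return len(text.split())
--
-- def enforce_min_chunk_words(chunks: list[str], min_words: int) -> list[str]:
--     chunks = [c.strip() for c in chunks if c and c.strip()]
--     if len(chunks) <= 1:
--         return [c for c in chunks if count_words(c) >= min_words]
--
--     # Repeatedly merge small chunks into neighbors until all chunks meet threshold
--     # or only one chunk remains (for short documents).
--     while len(chunks) > 1:
--         small_idx = next((i for i, c in enumerate(chunks) if count_words(c) < min_words), None)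
--         if small_idx is None:
--             break
--         if small_idx == 0:
--             chunks[1] = f"{chunks[0]} {chunks[1]}".strip()
--             del chunks[0]
--         else:
--             chunks[small_idx - 1] = f"{chunks[small_idx - 1]} {chunks[small_idx]}".strip()
--             del chunks[small_idx]
--     return [c for c in chunks if count_words(c) >= min_words]
-- ===== SOURCE B (Python) =====
-- def count_words(text: str) -> int:
--     return len(text.split())
--
-- def enforce_min_chunk_words(chunks: list[str], min_words: int) -> list[str]:
--     # Single left-to-right pass: keep a current accumulator chunk with its word
--     # count; merge while either side is under the threshold, otherwise emit.
--     out: list[str] = []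
--     cur = None  # (text, word_count) of the chunk being accumulated
--     for raw in chunks:
--         c = raw.strip()
--         if not c:
--             continue
--         n = count_words(c)
--         if cur is None:
--             cur = (c, n)
--         elif cur[1] < min_words or n < min_words:
--             cur = (cur[0] + " " + c, cur[1] + n)
--         else:
--             out.append(cur[0])
--             cur = (c, n)
--     if cur is not None and cur[1] >= min_words:
--         out.append(cur[0])
--     return out
-- ===== Notes on version B (the rewrite author's own statement) =====
-- stated objective: faster
-- what changed: Replaced the repeated find-first-small-then-delete loop (which rescans and recounts the whole list after every merge) by a single left-to-right pass that keeps one accumulator chunk with an incrementally maintained word count, merging while either side is below the threshold and emitting otherwise.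
import Mathlib
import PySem

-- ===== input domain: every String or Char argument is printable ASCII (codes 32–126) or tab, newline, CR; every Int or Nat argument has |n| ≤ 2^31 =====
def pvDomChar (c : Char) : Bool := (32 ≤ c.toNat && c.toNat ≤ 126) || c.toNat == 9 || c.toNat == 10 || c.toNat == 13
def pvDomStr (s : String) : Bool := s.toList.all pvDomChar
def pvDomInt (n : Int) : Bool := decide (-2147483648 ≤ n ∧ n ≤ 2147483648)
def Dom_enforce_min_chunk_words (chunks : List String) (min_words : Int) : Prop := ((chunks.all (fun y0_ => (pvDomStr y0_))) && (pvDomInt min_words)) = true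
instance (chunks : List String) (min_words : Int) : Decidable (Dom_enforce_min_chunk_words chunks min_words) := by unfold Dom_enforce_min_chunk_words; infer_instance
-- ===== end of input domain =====

-- B replaces A's repeated find-first-small/merge/delete rescans by one left-to-right
-- pass with an incrementally counted accumulator chunk (objective: faster).

-- ===== PORT A =====
-- count_words(text) = len(text.split())
def pvCountWords (text : String) : Int := ((PySem.Str.split₀ text).length : Int)

-- f"{a} {b}".strip()
def pvMergeA (a b : String) : String := PySem.Str.strip (a ++ " " ++ b)

-- the while-loop of A: repeatedly merge the first under-threshold chunk into a neighbor
def pvLoopA (min_words : Int) (chunks : List String) : List String :=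
  if _h : chunks.length ≤ 1 then chunks
  else
    match _hf : chunks.findIdx? (fun c => decide (pvCountWords c < min_words)) with
    | none => chunks
    | some 0 =>
        pvLoopA min_words (pvMergeA (chunks.getD 0 "") (chunks.getD 1 "") :: chunks.drop 2)
    | some (i+1) =>
        pvLoopA min_words
          (chunks.take i ++ [pvMergeA (chunks.getD i "") (chunks.getD (i+1) "")] ++ chunks.drop (i+2))
termination_by chunks.length
decreasing_by
  · simp only [List.length_cons, List.length_drop]; omega
  · have hb := (List.findIdx?_eq_some_iff_getElem.mp _hf).1
    simp only [List.length_append, List.length_take, List.length_cons, List.length_nil,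
      List.length_drop]
    omega

def enforce_min_chunk_words (chunks : List String) (min_words : Int) : List String :=
  let cleaned := (chunks.filter (fun c => !(c == "") && !(PySem.Str.strip c == ""))).map PySem.Str.strip
  if cleaned.length ≤ 1 then
    cleaned.filter (fun c => decide (min_words ≤ pvCountWords c))
  else
    (pvLoopA min_words cleaned).filter (fun c => decide (min_words ≤ pvCountWords c))

-- ===== PORT B =====
-- loop body of B once the chunk is stripped and known non-empty
def pvCore (min_words : Int) (st : List String × Option (String × Int)) (c : String) :
    List String × Option (String × Int) :=
  let n : Int := pvCountWords c
  match st with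
  | (out, none) => (out, some (c, n))
  | (out, some (cur, k)) =>
      if k < min_words ∨ n < min_words then (out, some (cur ++ " " ++ c, k + n))
      else (out ++ [cur], some (c, n))

-- one iteration of B's for-loop: strip, skip empties, then the core step
def pvStepB (min_words : Int) (st : List String × Option (String × Int)) (raw : String) :
    List String × Option (String × Int) :=
  let c := PySem.Str.strip raw
  if c == "" then st else pvCore min_words st c

def enforce_min_chunk_words_alt (chunks : List String) (min_words : Int) : List String :=
  match chunks.foldl (pvStepB min_words) ([], none) with
  | (out, none) => out
  | (out, some (cur, k)) => if min_words ≤ k then out ++ [cur] else out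

-- ===== PRECONDITION & SPEC =====
def Spec_enforce_min_chunk_words (chunks : List String) (min_words : Int) (out : List String) : Prop := out = enforce_min_chunk_words_alt chunks min_words
instance (chunks : List String) (min_words : Int) (out : List String) : Decidable (Spec_enforce_min_chunk_words chunks min_words out) := by unfold Spec_enforce_min_chunk_words; infer_instance

-- ===== CLAIM (what is proved, stated in full; the proofs are below) =====
def Claim_equal_enforce_min_chunk_words : Prop := ∀ (chunks : List String) (min_words : Int), Dom_enforce_min_chunk_words chunks min_words → Spec_enforce_min_chunk_words chunks min_words (enforce_min_chunk_words chunks min_words)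

-- ===== LEMMAS AND PROOFS =====

-- a chunk is "good" when it is non-empty and carries no leading/trailing whitespace
def GoodL (l : List Char) : Prop :=
  l ≠ [] ∧ (∀ c, l.head? = some c → PySem.Chars.isspace c = false) ∧
    (∀ c, l.getLast? = some c → PySem.Chars.isspace c = false)

def GoodS (s : String) : Prop := GoodL s.toList

def GoodAll (l : List String) : Prop := ∀ s ∈ l, GoodS s

-- ---- facts about split₀ ----
theorem pv_go_acc (xs : List Char) : ∀ cur acc,
    PySem.Chars.split₀.go xs cur acc = acc.reverse ++ PySem.Chars.split₀.go xs cur [] := by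
  induction xs with
  | nil =>
      intro cur acc
      simp only [PySem.Chars.split₀.go]
      by_cases h : cur.isEmpty <;> simp [h]
  | cons c rest ih =>
      intro cur acc
      simp only [PySem.Chars.split₀.go]
      by_cases hs : PySem.Chars.isspace c
      · by_cases hc : cur.isEmpty <;> simp only [hs, hc, if_true]
        · rw [ih [] acc]
        · rw [ih [] (cur.reverse :: acc), ih [] [cur.reverse]]
          simp
      · simp only [hs]
        exact ih (c :: cur) acc

theorem pv_go_append (xs ys : List Char) : ∀ cur acc,
    PySem.Chars.split₀.go (xs ++ ' ' :: ys) cur acc =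
      PySem.Chars.split₀.go xs cur acc ++ PySem.Chars.split₀.go ys [] [] := by
  induction xs with
  | nil =>
      intro cur acc
      have hsp : PySem.Chars.isspace ' ' = true := by decide
      simp only [List.nil_append, PySem.Chars.split₀.go, hsp, if_true]
      by_cases hc : cur.isEmpty <;> simp only [hc, if_true]
      · rw [pv_go_acc ys [] acc]
      · rw [pv_go_acc ys [] (cur.reverse :: acc)]
        simp
  | cons c rest ih =>
      intro cur acc
      simp only [List.cons_append, PySem.Chars.split₀.go]
      by_cases hs : PySem.Chars.isspace c
      · by_cases hc : cur.isEmpty <;> simp only [hs, hc, if_true] <;>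
          apply ih
      · simp only [hs]
        apply ih

theorem pv_split₀_append (xs ys : List Char) :
    PySem.Chars.split₀ (xs ++ ' ' :: ys) = PySem.Chars.split₀ xs ++ PySem.Chars.split₀ ys := by
  simpa [PySem.Chars.split₀] using pv_go_append xs ys [] []

theorem pv_toList_merge (a b : String) : (a ++ " " ++ b).toList = a.toList ++ ' ' :: b.toList := by
  simp [String.toList_append]

theorem pv_countW_merge (a b : String) :
    pvCountWords (a ++ " " ++ b) = pvCountWords a + pvCountWords b := by
  unfold pvCountWords
  have h : ∀ s : String, (PySem.Str.split₀ s).length = (PySem.Chars.split₀ s.toList).length := by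
    intro s; simp [PySem.Str.split₀]
  rw [h, h, h, pv_toList_merge, pv_split₀_append]
  simp

theorem pv_countW_nonneg (a : String) : 0 ≤ pvCountWords a := by
  unfold pvCountWords; positivity

-- dropWhile is the identity on a list whose head fails the predicate
theorem pv_dropWhile_id {p : Char → Bool} {l : List Char}
    (h : ∀ c, l.head? = some c → p c = false) : l.dropWhile p = l := by
  cases l with
  | nil => rfl
  | cons c rest =>
      have := h c rfl
      simp [this]

theorem pv_strip_merge {a b : List Char} (ha : GoodL a) (hb : GoodL b) :
    PySem.Chars.strip (a ++ ' ' :: b) = a ++ ' ' :: b := by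
  obtain ⟨hane, hah, _⟩ := ha
  obtain ⟨hbne, _, hbl⟩ := hb
  unfold PySem.Chars.strip PySem.Chars.lstrip PySem.Chars.rstrip
  have h1 : (a ++ ' ' :: b).dropWhile PySem.Chars.isspace = a ++ ' ' :: b := by
    apply pv_dropWhile_id
    intro c hc
    cases a with
    | nil => exact absurd rfl hane
    | cons x xs => exact hah c (by simpa using hc)
  rw [h1]
  have h2 : (a ++ ' ' :: b).reverse.dropWhile PySem.Chars.isspace = (a ++ ' ' :: b).reverse := by
    apply pv_dropWhile_id
    intro c hc
    rw [List.head?_reverse] at hc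
    rw [List.getLast?_append] at hc
    have : (' ' :: b).getLast? = b.getLast?.or (some ' ') := by
      rw [show (' ' :: b) = [' '] ++ b from rfl, List.getLast?_append]; rfl
    rw [this] at hc
    cases hgb : b.getLast? with
    | none => exact absurd hgb (by simp [List.getLast?_eq_none_iff, hbne])
    | some d =>
        rw [hgb] at hc
        simp at hc
        subst hc
        exact hbl d hgb
  rw [h2, List.reverse_reverse]

theorem pv_mergeA_eq {a b : String} (ha : GoodS a) (hb : GoodS b) :
    pvMergeA a b = a ++ " " ++ b := by
  unfold pvMergeA PySem.Str.strip
  rw [pv_toList_merge, pv_strip_merge ha hb, ← pv_toList_merge, String.ofList_toList]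

theorem pv_merge_good {a b : String} (ha : GoodS a) (hb : GoodS b) : GoodS (a ++ " " ++ b) := by
  obtain ⟨hane, hah, _⟩ := ha
  obtain ⟨hbne, _, hbl⟩ := hb
  unfold GoodS GoodL
  rw [pv_toList_merge]
  refine ⟨by simp, ?_, ?_⟩
  · intro c hc
    cases h : a.toList with
    | nil => exact absurd h hane
    | cons x xs =>
        rw [h] at hc
        apply hah
        rw [h]
        simpa using hc
  · intro c hc
    rw [List.getLast?_append] at hc
    have : (' ' :: b.toList).getLast? = b.toList.getLast?.or (some ' ') := by
      rw [show (' ' :: b.toList) = [' '] ++ b.toList from rfl, List.getLast?_append]; rfl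
    rw [this] at hc
    cases hgb : b.toList.getLast? with
    | none => exact absurd hgb (by simp [List.getLast?_eq_none_iff, hbne])
    | some d =>
        rw [hgb] at hc
        simp at hc
        subst hc
        exact hbl d hgb

theorem pv_head?_dropWhile {α : Type} (p : α → Bool) (l : List α) :
    ∀ c, (l.dropWhile p).head? = some c → p c = false := by
  intro c hc
  have hne : l.dropWhile p ≠ [] := by intro h; rw [h] at hc; simp at hc
  have h1 := List.head_dropWhile_not p hne
  rw [List.head?_eq_some_head hne, Option.some.injEq] at hc
  rw [← hc]; exact h1

theorem pv_getLast?_dropWhile {α : Type} (p : α → Bool) (l : List α) (h : l.dropWhile p ≠ []) :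
    (l.dropWhile p).getLast? = l.getLast? := by
  induction l with
  | nil => simp at h
  | cons c rest ih =>
      rw [List.dropWhile_cons]
      by_cases hp : p c
      · simp only [hp, if_true]
        rw [List.dropWhile_cons, hp, if_pos rfl] at h
        rw [ih h]
        have hrne : rest ≠ [] := by intro he; rw [he] at h; simp at h
        cases rest with
        | nil => simp at hrne
        | cons d ds => simp [List.getLast?_cons_cons]
      · simp [hp]

-- stripping a string yields a good chunk (unless empty)
theorem pv_good_strip {s : String} (h : ¬ PySem.Str.strip s = "") : GoodS (PySem.Str.strip s) := by
  have hl : (PySem.Str.strip s).toList = PySem.Chars.strip s.toList := PySem.Str.toList_strip s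
  unfold GoodS GoodL
  rw [hl]
  have hne : PySem.Chars.strip s.toList ≠ [] := by
    intro he
    apply h
    have : PySem.Str.strip s = String.ofList (PySem.Chars.strip s.toList) := rfl
    rw [this, he]
  unfold PySem.Chars.strip PySem.Chars.rstrip PySem.Chars.lstrip at hne ⊢
  refine ⟨hne, ?_, ?_⟩
  · -- head of the strip = last of the inner dropWhile result = head of lstrip
    intro c hc
    rw [List.head?_reverse] at hc
    have hrne : (s.toList.dropWhile PySem.Chars.isspace).reverse.dropWhile PySem.Chars.isspace ≠ [] := by
      intro he; rw [he] at hne; simp at hne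
    rw [pv_getLast?_dropWhile _ _ hrne, List.getLast?_reverse] at hc
    exact pv_head?_dropWhile _ _ c hc
  · intro c hc
    rw [List.getLast?_reverse] at hc
    exact pv_head?_dropWhile _ _ c hc

-- ---- the common one-pass specification ----
def pvSpecL (m : Int) : List String → List String
  | [] => []
  | [c] => [c]
  | a :: b :: rest =>
      if pvCountWords a < m ∨ pvCountWords b < m then pvSpecL m ((a ++ " " ++ b) :: rest)
      else a :: pvSpecL m (b :: rest)
termination_by l => l.length

-- ---- A's loop computes pvSpecL ----
theorem pvLoopA_short {m : Int} {cs : List String} (h : cs.length ≤ 1) : pvLoopA m cs = cs := by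
  rw [pvLoopA.eq_def, dif_pos h]

theorem pvLoopA_none {m : Int} {cs : List String} (h1 : ¬ cs.length ≤ 1)
    (h2 : cs.findIdx? (fun c => decide (pvCountWords c < m)) = none) : pvLoopA m cs = cs := by
  rw [pvLoopA.eq_def, dif_neg h1]; split <;> simp_all

theorem pvLoopA_zero {m : Int} {cs : List String} (h1 : ¬ cs.length ≤ 1)
    (h2 : cs.findIdx? (fun c => decide (pvCountWords c < m)) = some 0) :
    pvLoopA m cs = pvLoopA m (pvMergeA (cs.getD 0 "") (cs.getD 1 "") :: cs.drop 2) := by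
  rw [pvLoopA.eq_def, dif_neg h1]; split <;> simp_all

theorem pvLoopA_succ {m : Int} {cs : List String} {i : Nat} (h1 : ¬ cs.length ≤ 1)
    (h2 : cs.findIdx? (fun c => decide (pvCountWords c < m)) = some (i+1)) :
    pvLoopA m cs = pvLoopA m
      (cs.take i ++ [pvMergeA (cs.getD i "") (cs.getD (i+1) "")] ++ cs.drop (i+2)) := by
  rw [pvLoopA.eq_def, dif_neg h1]; split <;> simp_all

theorem pv_cons_big (m : Int) : ∀ (n : Nat) (xs : List String) (a : String), xs.length ≤ n →
    GoodS a → GoodAll xs → m ≤ pvCountWords a →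
    (∀ h : xs ≠ [], m ≤ pvCountWords (xs.head h)) →
    pvLoopA m (a :: xs) = a :: pvLoopA m xs := by
  intro n
  induction n with
  | zero =>
      intro xs a hlen _ _ _ _
      have hx : xs = [] := List.length_eq_zero_iff.mp (Nat.le_zero.mp hlen)
      subst hx
      rw [pvLoopA_short (by simp), pvLoopA_short (by simp)]
  | succ n ih =>
      intro xs a hlen hga hgxs hbig hhead
      cases xs with
      | nil => rw [pvLoopA_short (by simp), pvLoopA_short (by simp)]
      | cons b rest =>
          have hgb : GoodS b := hgxs b (by simp)
          have hbbig : m ≤ pvCountWords b := hhead (by simp)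
          have hpa : decide (pvCountWords a < m) = false := by
            simp only [decide_eq_false_iff_not, not_lt]; exact hbig
          have hpb : decide (pvCountWords b < m) = false := by
            simp only [decide_eq_false_iff_not, not_lt]; exact hbbig
          cases hf : rest.findIdx? (fun c => decide (pvCountWords c < m)) with
          | none =>
              have hfb : (b :: rest).findIdx? (fun c => decide (pvCountWords c < m)) = none := by
                simp [List.findIdx?_cons, hpb, hf]
              have hfab : (a :: b :: rest).findIdx? (fun c => decide (pvCountWords c < m)) = none := by
                simp [List.findIdx?_cons, hpa, hfb]
              rw [pvLoopA_none (by simp) hfab]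
              cases rest with
              | nil => rw [pvLoopA_short (by simp)]
              | cons c r => rw [pvLoopA_none (by simp) hfb]
          | some j =>
              have hjlt : j < rest.length := (List.findIdx?_eq_some_iff_getElem.mp hf).1
              have hfb : (b :: rest).findIdx? (fun c => decide (pvCountWords c < m)) = some (j+1) := by
                simp [List.findIdx?_cons, hpb, hf]
              have hfab : (a :: b :: rest).findIdx? (fun c => decide (pvCountWords c < m)) =
                  some (j+2) := by
                simp [List.findIdx?_cons, hpa, hfb]
              rw [pvLoopA_succ (cs := a :: b :: rest) (i := j+1) (by simp) hfab]
              rw [pvLoopA_succ (cs := b :: rest) (i := j) (by simp only [List.length_cons]; omega) hfb]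
              have hre : (a :: b :: rest).take (j+1) ++
                    [pvMergeA ((a :: b :: rest).getD (j+1) "") ((a :: b :: rest).getD (j+2) "")] ++
                    (a :: b :: rest).drop (j+3) =
                  a :: ((b :: rest).take j ++
                    [pvMergeA ((b :: rest).getD j "") ((b :: rest).getD (j+1) "")] ++
                    (b :: rest).drop (j+2)) := by
                simp [List.getD]
              rw [hre]
              have hj1 : j < (b :: rest).length := by simp; omega
              have hj2 : j + 1 < (b :: rest).length := by simp; omega
              have hgj : GoodS ((b :: rest).getD j "") := by
                rw [List.getD_eq_getElem _ _ hj1]; exact hgxs _ (List.getElem_mem hj1)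
              have hgj1 : GoodS ((b :: rest).getD (j+1) "") := by
                rw [List.getD_eq_getElem _ _ hj2]; exact hgxs _ (List.getElem_mem hj2)
              have hmg : pvMergeA ((b :: rest).getD j "") ((b :: rest).getD (j+1) "") =
                  (b :: rest).getD j "" ++ " " ++ (b :: rest).getD (j+1) "" :=
                pv_mergeA_eq hgj hgj1
              apply ih
              · -- length bound
                simp only [List.length_append, List.length_take, List.length_cons,
                  List.length_nil, List.length_drop] at hlen ⊢
                omega
              · exact hga
              · -- goodness of the merged list
                intro s hs
                simp only [List.mem_append, List.mem_singleton] at hs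
                rcases hs with (hs | hs) | hs
                · exact hgxs s (List.take_subset _ _ hs)
                · rw [hs, hmg]; exact pv_merge_good hgj hgj1
                · exact hgxs s (List.drop_subset _ _ hs)
              · exact hbig
              · -- head of the merged list is still big
                intro hne
                obtain rfl | ⟨j', rfl⟩ : j = 0 ∨ ∃ j', j = j' + 1 := by
                  cases j with
                  | zero => exact Or.inl rfl
                  | succ k => exact Or.inr ⟨k, rfl⟩
                · simp only [List.take_zero, List.nil_append, List.singleton_append,
                    List.head_cons]
                  rw [hmg, pv_countW_merge, show ((b :: rest).getD 0 "") = b from rfl]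
                  have := pv_countW_nonneg ((b :: rest).getD (0+1) "")
                  omega
                · simp only [List.take_succ_cons, List.cons_append, List.head_cons]
                  exact hbbig

theorem pv_loopA_eq_spec (m : Int) : ∀ (n : Nat) (cs : List String), cs.length ≤ n →
    GoodAll cs → pvLoopA m cs = pvSpecL m cs := by
  intro n
  induction n with
  | zero =>
      intro cs hlen _
      have hx : cs = [] := List.length_eq_zero_iff.mp (Nat.le_zero.mp hlen)
      subst hx
      rw [pvLoopA_short (by simp), pvSpecL]
  | succ n ih =>
      intro cs hlen hg
      match cs with
      | [] => rw [pvLoopA_short (by simp), pvSpecL]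
      | [c] => rw [pvLoopA_short (by simp), pvSpecL]
      | a :: b :: rest =>
          have hga : GoodS a := hg a (by simp)
          have hgb : GoodS b := hg b (by simp)
          have hgrest : GoodAll rest := fun s hs => hg s (by simp [hs])
          have hmab : pvMergeA a b = a ++ " " ++ b := pv_mergeA_eq hga hgb
          have hlen' : (b :: rest).length ≤ n := by
            simp only [List.length_cons] at hlen ⊢; omega
          by_cases hsa : pvCountWords a < m
          · have hf : (a :: b :: rest).findIdx? (fun c => decide (pvCountWords c < m)) =
                some 0 := by
              simp [List.findIdx?_cons, hsa]
            rw [pvLoopA_zero (by simp) hf]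
            have hre : pvMergeA ((a :: b :: rest).getD 0 "") ((a :: b :: rest).getD 1 "") ::
                (a :: b :: rest).drop 2 = (a ++ " " ++ b) :: rest := by
              simp only [List.getD, List.drop_succ_cons, List.drop_zero]
              rw [show ((a :: b :: rest)[0]?.getD "") = a from rfl,
                show ((a :: b :: rest)[1]?.getD "") = b from rfl, hmab]
            rw [hre]
            rw [ih _ (by simp only [List.length_cons] at hlen ⊢; omega)
              (by intro s hs; rcases List.mem_cons.mp hs with h | h
                  · rw [h, ← hmab]; exact (hmab ▸ pv_merge_good hga hgb)
                  · exact hgrest s h)]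
            rw [pvSpecL, if_pos (Or.inl hsa)]
          · by_cases hsb : pvCountWords b < m
            · have hpa : decide (pvCountWords a < m) = false := by
                simp only [decide_eq_false_iff_not]; exact hsa
              have hf : (a :: b :: rest).findIdx? (fun c => decide (pvCountWords c < m)) =
                  some 1 := by
                simp [List.findIdx?_cons, hpa, hsb]
              rw [pvLoopA_succ (cs := a :: b :: rest) (i := 0) (by simp) hf]
              have hre : (a :: b :: rest).take 0 ++
                  [pvMergeA ((a :: b :: rest).getD 0 "") ((a :: b :: rest).getD 1 "")] ++
                  (a :: b :: rest).drop 2 = (a ++ " " ++ b) :: rest := by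
                simp only [List.take_zero, List.nil_append, List.drop_succ_cons, List.drop_zero]
                rw [show ((a :: b :: rest).getD 0 "") = a from rfl,
                  show ((a :: b :: rest).getD 1 "") = b from rfl, hmab, List.singleton_append]
              rw [hre]
              rw [ih _ (by simp only [List.length_cons] at hlen ⊢; omega)
                (by intro s hs; rcases List.mem_cons.mp hs with h | h
                    · rw [h]; exact pv_merge_good hga hgb
                    · exact hgrest s h)]
              rw [pvSpecL, if_pos (Or.inr hsb)]
            · rw [pvSpecL, if_neg (by push Not; exact ⟨not_lt.mp hsa, not_lt.mp hsb⟩)]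
              rw [← ih (b :: rest) hlen' (fun s hs => hg s (by simp at hs ⊢; tauto))]
              exact pv_cons_big m (b :: rest).length (b :: rest) a le_rfl hga
                (fun s hs => hg s (by simp at hs ⊢; tauto)) (not_lt.mp hsa)
                (fun _ => not_lt.mp hsb)

-- ---- B's fold computes pvSpecL (filtered) ----
def pvFinish (m : Int) (st : List String × Option (String × Int)) : List String :=
  match st with
  | (out, none) => out
  | (out, some (cur, k)) => if m ≤ k then out ++ [cur] else out

theorem pv_foldCore (m : Int) : ∀ (cs : List String) (out : List String) (cur : String),
    GoodAll cs → GoodS cur →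
    pvFinish m (List.foldl (pvCore m) (out, some (cur, pvCountWords cur)) cs) =
      out ++ (pvSpecL m (cur :: cs)).filter (fun c => decide (m ≤ pvCountWords c)) := by
  intro cs
  induction cs with
  | nil =>
      intro out cur _ _
      by_cases h : m ≤ pvCountWords cur <;> simp [pvFinish, pvSpecL, h]
  | cons c cs ih =>
      intro out cur hg hcur
      have hgc : GoodS c := hg c (by simp)
      have hgcs : GoodAll cs := fun s hs => hg s (by simp [hs])
      rw [List.foldl_cons]
      by_cases hsm : pvCountWords cur < m ∨ pvCountWords c < m
      · have hstep : pvCore m (out, some (cur, pvCountWords cur)) c =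
            (out, some (cur ++ " " ++ c, pvCountWords cur + pvCountWords c)) := by
          simp [pvCore, hsm]
        rw [hstep, ← pv_countW_merge, ih out _ hgcs (pv_merge_good hcur hgc)]
        rw [pvSpecL]
        simp [hsm]
      · have hstep : pvCore m (out, some (cur, pvCountWords cur)) c =
            (out ++ [cur], some (c, pvCountWords c)) := by
          simp [pvCore, hsm]
        rw [hstep, ih (out ++ [cur]) c hgcs hgc]
        rw [pvSpecL]
        push Not at hsm
        rw [if_neg (by push Not; exact hsm)]
        simp [hsm.1]

theorem pv_fold_strip (m : Int) : ∀ (chunks : List String) (st : List String × Option (String × Int)),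
    List.foldl (pvStepB m) st chunks =
      List.foldl (pvCore m) st
        ((chunks.filter (fun c => !(PySem.Str.strip c == ""))).map PySem.Str.strip) := by
  intro chunks
  induction chunks with
  | nil => intro st; rfl
  | cons c rest ih =>
      intro st
      by_cases h : PySem.Str.strip c == "" <;>
        simp [pvStepB, h, ih]

theorem pv_alt_eq_finish (chunks : List String) (m : Int) :
    enforce_min_chunk_words_alt chunks m = pvFinish m (chunks.foldl (pvStepB m) ([], none)) := by
  unfold enforce_min_chunk_words_alt pvFinish
  rcases chunks.foldl (pvStepB m) ([], none) with ⟨out, _ | ⟨cur, k⟩⟩ <;> rfl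

-- ===== VERDICT (by name: the statement is the Claim_ definition above) =====
theorem enforce_min_chunk_words_spec : Claim_equal_enforce_min_chunk_words := by
  intro chunks m _
  unfold Spec_enforce_min_chunk_words
  set cleaned :=
    (chunks.filter (fun c => !(c == "") && !(PySem.Str.strip c == ""))).map PySem.Str.strip with hcl
  have hstrip_empty : PySem.Str.strip "" = "" := by decide
  have hfilters : chunks.filter (fun c => !(c == "") && !(PySem.Str.strip c == "")) =
      chunks.filter (fun c => !(PySem.Str.strip c == "")) := by
    apply List.filter_congr
    intro c _
    by_cases h : c = ""
    · subst h; simp [hstrip_empty]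
    · simp [h]
  have hgood : GoodAll cleaned := by
    intro s hs
    rw [hcl, List.mem_map] at hs
    obtain ⟨c, hc, rfl⟩ := hs
    rw [List.mem_filter] at hc
    have := hc.2
    simp only [Bool.and_eq_true, Bool.not_eq_true', beq_eq_false_iff_ne] at this
    exact pv_good_strip this.2
  have hA : enforce_min_chunk_words chunks m =
      (pvSpecL m cleaned).filter (fun c => decide (m ≤ pvCountWords c)) := by
    show (if cleaned.length ≤ 1 then cleaned.filter (fun c => decide (m ≤ pvCountWords c))
      else (pvLoopA m cleaned).filter (fun c => decide (m ≤ pvCountWords c))) = _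
    by_cases hlen : cleaned.length ≤ 1
    · rw [if_pos hlen]
      congr 1
      cases hc : cleaned with
      | nil => rw [pvSpecL]
      | cons a t =>
          cases t with
          | nil => rw [pvSpecL]
          | cons b t' => rw [hc] at hlen; simp at hlen
    · rw [if_neg hlen, pv_loopA_eq_spec m cleaned.length cleaned le_rfl hgood]
  have hB : enforce_min_chunk_words_alt chunks m =
      (pvSpecL m cleaned).filter (fun c => decide (m ≤ pvCountWords c)) := by
    rw [pv_alt_eq_finish, pv_fold_strip, ← hfilters, ← hcl]
    cases hc : cleaned with
    | nil => simp [pvFinish, pvSpecL]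
    | cons c cs =>
        have hgc : GoodS c := by rw [hc] at hgood; exact hgood c (by simp)
        have hgcs : GoodAll cs := by rw [hc] at hgood; exact fun s hs => hgood s (by simp [hs])
        rw [List.foldl_cons]
        have hfirst : pvCore m ([], none) c = ([], some (c, pvCountWords c)) := rfl
        rw [hfirst, pv_foldCore m cs [] c hgcs hgc]
        simp
  rw [hA, hB]
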